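-- pv_equiv track=rewrite | github.com/chiragpatel1229/Cryptographic-RBGs-Development-and-Analysis | Other_All_Files/Random and m-sequence gap structures and Chi-Square test.py | cal_gap_str
-- ===== SOURCE A (Python) =====
-- def cal_gap_str(sequence):
--     gap = []
--     gap_counter = 0
--     no_gap = 0                  # when we do not know the first bit is 1 or 0 so the condition is false
--
--     for bits in sequence:
--         if bits == 0:
--             gap_counter += 1    # calculate the number of continued zeros between two ones
--         elif bits == 1:         # finds the 1s in a list start checking for no gaps.
--             if no_gap:          # if there are two continued 1s in a list then append the counter
--                 gap.append(gap_counter)  # add 0s in every step with no gap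
--             gap_counter = 0     # Reset the counter
--             no_gap = 1          # found the no_gap in the list, it is true
--     return gap
-- ===== SOURCE B (Python) =====
-- def cal_gap_str(sequence):
--     # Filter to the binary symbols A actually reacts to, then gap = distance
--     # between consecutive one-positions minus one (all in-between are zeros).
--     bits = [b for b in sequence if b == 0 or b == 1]
--     ones = [i for i, b in enumerate(bits) if b == 1]
--     return [q - p - 1 for p, q in zip(ones, ones[1:])]
-- ===== Notes on version B (the rewrite author's own statement) =====
-- stated objective: alternative
-- what changed: Replaces A's single stateful scan (counter + seen-a-one flag) by a filter-to-binary pass, a one-index pass, and index differences q-p-1 between consecutive ones.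
import Mathlib
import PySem

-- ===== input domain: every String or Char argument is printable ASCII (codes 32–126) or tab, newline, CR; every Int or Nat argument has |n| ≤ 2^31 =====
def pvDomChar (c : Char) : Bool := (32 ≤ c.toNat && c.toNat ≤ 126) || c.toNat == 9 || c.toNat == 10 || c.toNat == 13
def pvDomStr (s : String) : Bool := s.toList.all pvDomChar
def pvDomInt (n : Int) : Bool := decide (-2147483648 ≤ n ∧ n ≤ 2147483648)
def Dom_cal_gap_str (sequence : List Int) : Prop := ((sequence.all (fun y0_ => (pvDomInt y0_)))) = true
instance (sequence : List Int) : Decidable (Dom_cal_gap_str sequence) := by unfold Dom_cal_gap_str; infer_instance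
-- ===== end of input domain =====

-- B restructures A's single stateful scan into filter-to-binary, collect one-indices, take index differences; same value everywhere.

-- ===== PORT A =====
-- state = (gap, gap_counter, no_gap); Python's truthy int no_gap ported as Int, tested ≠ 0
def cal_gap_str (sequence : List Int) : List Int :=
  (sequence.foldl (fun (st : List Int × Int × Int) bits =>
      if bits = 0 then (st.1, st.2.1 + 1, st.2.2)
      else if bits = 1 then
        ((if st.2.2 ≠ 0 then st.1 ++ [st.2.1] else st.1), 0, 1)
      else st) ([], 0, 0)).1

-- ===== PORT B =====
def cal_gap_str_alt (sequence : List Int) : List Int :=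
  let bits := sequence.filter (fun b => b == 0 || b == 1)
  let ones := ((PySem.List.enumerate bits).filter (fun p => p.2 == 1)).map (fun p => p.1)
  (ones.zip ones.tail).map (fun p => p.2 - p.1 - 1)

-- ===== PRECONDITION & SPEC =====
def Spec_cal_gap_str (sequence : List Int) (out : List Int) : Prop := out = cal_gap_str_alt sequence
instance (sequence : List Int) (out : List Int) : Decidable (Spec_cal_gap_str sequence out) := by unfold Spec_cal_gap_str; infer_instance

-- ===== CLAIM (what is proved, stated in full; the proofs are below) =====
def Claim_equal_cal_gap_str : Prop := ∀ (sequence : List Int), Dom_cal_gap_str sequence → Spec_cal_gap_str sequence (cal_gap_str sequence)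

-- ===== LEMMAS AND PROOFS =====

-- step function of A's fold
def pvStep (st : List Int × Int × Int) (bits : Int) : List Int × Int × Int :=
  if bits = 0 then (st.1, st.2.1 + 1, st.2.2)
  else if bits = 1 then
    ((if st.2.2 ≠ 0 then st.1 ++ [st.2.1] else st.1), 0, 1)
  else st

theorem pvStep_zero (g : List Int) (c n : Int) : pvStep (g, c, n) 0 = (g, c + 1, n) := by
  simp [pvStep]

theorem pvStep_one (g : List Int) (c n : Int) :
    pvStep (g, c, n) 1 = ((if n ≠ 0 then g ++ [c] else g), 0, 1) := by
  simp [pvStep]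

-- reference: gaps once a 1 has been seen, counter c
def pvGo (c : Int) : List Int → List Int
  | [] => []
  | b :: xs => if b = 1 then c :: pvGo 0 xs else pvGo (c + 1) xs

-- reference: skip to the first 1, then pvGo
def pvGaps : List Int → List Int
  | [] => []
  | b :: xs => if b = 1 then pvGo 0 xs else pvGaps xs

-- one-indices of a list, starting offset s
def pvOnes (s : Int) (xs : List Int) : List Int :=
  ((PySem.List.enumerate xs s).filter (fun p => p.2 == 1)).map (fun p => p.1)

def pvDiffs (l : List Int) : List Int := (l.zip l.tail).map (fun p => p.2 - p.1 - 1)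

theorem pvOnes_nil (s : Int) : pvOnes s [] = [] := by
  simp [pvOnes, PySem.List.enumerate]

theorem pvOnes_cons_one (s : Int) (xs : List Int) :
    pvOnes s (1 :: xs) = s :: pvOnes (s + 1) xs := by
  simp [pvOnes, PySem.List.enumerate_cons]

theorem pvOnes_cons_ne (s : Int) (b : Int) (xs : List Int) (h : b ≠ 1) :
    pvOnes s (b :: xs) = pvOnes (s + 1) xs := by
  simp [pvOnes, PySem.List.enumerate_cons, h]

theorem pvMap_add_add (l : List Int) (u v : Int) :
    (l.map (· + u)).map (· + v) = l.map (· + (u + v)) := by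
  simp only [List.map_map, Function.comp_def]
  congr 1; funext x; ring

theorem pvOnes_shift (t : Int) (xs : List Int) :
    pvOnes t xs = (pvOnes 0 xs).map (· + t) := by
  induction xs generalizing t with
  | nil => simp [pvOnes_nil]
  | cons b xs ih =>
    by_cases h : b = 1
    · subst h
      rw [pvOnes_cons_one, pvOnes_cons_one, ih (t + 1), ih (0 + 1), List.map_cons,
        pvMap_add_add]
      norm_num
      intro a _; ring
    · rw [pvOnes_cons_ne _ _ _ h, pvOnes_cons_ne _ _ _ h, ih (t + 1), ih (0 + 1),
        pvMap_add_add]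
      congr 1; funext x; ring

theorem pvDiffs_map_add (l : List Int) (t : Int) :
    pvDiffs (l.map (· + t)) = pvDiffs l := by
  induction l with
  | nil => simp [pvDiffs]
  | cons a l ih =>
    cases l with
    | nil => simp [pvDiffs]
    | cons b l =>
      simp only [List.map, pvDiffs, List.zip, List.tail] at *
      simp_all

theorem pvDiffs_cons_cons (a b : Int) (l : List Int) :
    pvDiffs (a :: b :: l) = (b - a - 1) :: pvDiffs (b :: l) := by
  simp [pvDiffs]

-- pvGo agrees with index differences on binary lists
theorem pvGo_eq (xs : List Int) (hb : ∀ b ∈ xs, b = 0 ∨ b = 1) (c : Int) :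
    pvGo c xs = match pvOnes 0 xs with
      | [] => []
      | o :: _ => (c + o) :: pvDiffs (pvOnes 0 xs) := by
  induction xs generalizing c with
  | nil => simp [pvGo, pvOnes_nil]
  | cons b xs ih =>
    have hbx : ∀ b ∈ xs, b = 0 ∨ b = 1 := fun b h => hb b (List.mem_cons_of_mem _ h)
    have hsh : pvOnes 1 xs = (pvOnes 0 xs).map (· + 1) := pvOnes_shift 1 xs
    rcases hb b List.mem_cons_self with h0 | h1
    · subst h0
      rw [pvOnes_cons_ne _ _ _ (by norm_num), zero_add, hsh, pvDiffs_map_add]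
      have hgo : pvGo c (0 :: xs) = pvGo (c + 1) xs := by simp [pvGo]
      rw [hgo, ih hbx (c + 1)]
      cases hxs : pvOnes 0 xs with
      | nil => simp
      | cons o r => simp; ring
    · subst h1
      rw [pvOnes_cons_one, zero_add, hsh]
      have hgo : pvGo c (1 :: xs) = c :: pvGo 0 xs := by simp [pvGo]
      rw [hgo, ih hbx 0]
      cases hxs : pvOnes 0 xs with
      | nil => simp [pvDiffs]
      | cons o r =>
        simp only [List.map_cons]
        rw [pvDiffs_cons_cons]
        have h2 : pvDiffs ((o + 1) :: r.map (· + 1)) = pvDiffs ((o :: r).map (· + 1)) := by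
          simp
        rw [h2, pvDiffs_map_add]
        simp

-- pvGaps agrees with B's core on binary lists
theorem pvGaps_eq (xs : List Int) (hb : ∀ b ∈ xs, b = 0 ∨ b = 1) :
    pvGaps xs = pvDiffs (pvOnes 0 xs) := by
  induction xs with
  | nil => simp [pvGaps, pvOnes_nil, pvDiffs]
  | cons b xs ih =>
    have hbx : ∀ b ∈ xs, b = 0 ∨ b = 1 := fun b h => hb b (List.mem_cons_of_mem _ h)
    have hsh : pvOnes 1 xs = (pvOnes 0 xs).map (· + 1) := pvOnes_shift 1 xs
    rcases hb b List.mem_cons_self with h0 | h1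
    · subst h0
      rw [pvOnes_cons_ne _ _ _ (by norm_num), zero_add, hsh, pvDiffs_map_add]
      have hg : pvGaps (0 :: xs) = pvGaps xs := by simp [pvGaps]
      rw [hg, ih hbx]
    · subst h1
      rw [pvOnes_cons_one, zero_add, hsh]
      have hg : pvGaps (1 :: xs) = pvGo 0 xs := by simp [pvGaps]
      rw [hg, pvGo_eq xs hbx 0]
      cases hxs : pvOnes 0 xs with
      | nil => simp [pvDiffs]
      | cons o r =>
        simp only [List.map_cons]
        rw [pvDiffs_cons_cons]
        have h2 : pvDiffs ((o + 1) :: r.map (· + 1)) = pvDiffs ((o :: r).map (· + 1)) := by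
          simp
        rw [h2, pvDiffs_map_add]
        simp

-- A's fold ignores non-binary elements
theorem foldl_step_filter (xs : List Int) (st : List Int × Int × Int) :
    xs.foldl pvStep st = (xs.filter (fun b => b == 0 || b == 1)).foldl pvStep st := by
  induction xs generalizing st with
  | nil => rfl
  | cons b xs ih =>
    by_cases h0 : b = 0
    · subst h0; simp only [List.foldl_cons]
      rw [ih]; simp
    · by_cases h1 : b = 1
      · subst h1; simp only [List.foldl_cons]
        rw [ih]; simp
      · have hst : pvStep st b = st := by simp [pvStep, h0, h1]
        have hf : List.filter (fun b => b == 0 || b == 1) (b :: xs)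
            = List.filter (fun b => b == 0 || b == 1) xs := by
          have hb2 : (b == 0 || b == 1) = false := by simp [h0, h1]
          simp [List.filter, hb2]
        rw [List.foldl_cons, hst, hf, ih]

-- A's fold after the first 1 equals pvGo
theorem foldl_seen (xs : List Int) (hb : ∀ b ∈ xs, b = 0 ∨ b = 1) (g : List Int) (c : Int) :
    (xs.foldl pvStep (g, c, 1)).1 = g ++ pvGo c xs := by
  induction xs generalizing g c with
  | nil => simp [pvGo]
  | cons b xs ih =>
    have hbx : ∀ b ∈ xs, b = 0 ∨ b = 1 := fun b h => hb b (List.mem_cons_of_mem _ h)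
    rcases hb b List.mem_cons_self with h0 | h1
    · subst h0
      rw [List.foldl_cons, pvStep_zero, ih hbx]
      simp [pvGo]
    · subst h1
      rw [List.foldl_cons, pvStep_one]
      simp only [if_pos (by norm_num : (1:Int) ≠ 0)]
      rw [ih hbx]
      simp [pvGo]

-- A's fold before the first 1 equals pvGaps
theorem foldl_unseen (xs : List Int) (hb : ∀ b ∈ xs, b = 0 ∨ b = 1) (c : Int) :
    (xs.foldl pvStep ([], c, 0)).1 = pvGaps xs := by
  induction xs generalizing c with
  | nil => simp [pvGaps]
  | cons b xs ih =>
    have hbx : ∀ b ∈ xs, b = 0 ∨ b = 1 := fun b h => hb b (List.mem_cons_of_mem _ h)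
    rcases hb b List.mem_cons_self with h0 | h1
    · subst h0
      rw [List.foldl_cons, pvStep_zero, ih hbx]
      simp [pvGaps]
    · subst h1
      rw [List.foldl_cons, pvStep_one]
      simp only [if_neg (by norm_num : ¬ ((0:Int) ≠ 0))]
      rw [foldl_seen xs hbx [] 0]
      simp [pvGaps]

-- ===== VERDICT (by name: the statement is the Claim_ definition above) =====
theorem cal_gap_str_spec : Claim_equal_cal_gap_str := by
  intro sequence _
  unfold Spec_cal_gap_str cal_gap_str cal_gap_str_alt
  have hb : ∀ b ∈ sequence.filter (fun b => b == 0 || b == 1), b = 0 ∨ b = 1 := by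
    intro b h
    have := List.of_mem_filter h
    simpa using this
  show (sequence.foldl pvStep ([], 0, 0)).1 = _
  rw [foldl_step_filter, foldl_unseen _ hb 0, pvGaps_eq _ hb]
  rfl
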